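-- pv_equiv track=rewrite | github.com/dawonseo/programmers_algorithm | [카카오]_n진수_게임.py | solution
-- ===== SOURCE A (Python) =====
-- def convert_iter(n, base):
--     T = "0123456789ABCDEF"
--     q, r = divmod(n, base)
--     return convert_iter(q, base) + T[r] if q else T[r]
--
-- def solution(n, t, m, p):
--     num_list = []
--     ans = ''
--
--     for i in range(t * m):
--         num_list.extend(list(convert_iter(i, n)))
--
--     order = 0
--
--     while len(ans) < t:
--         if order % m == (p - 1):
--             ans += num_list[order]
--         order += 1
--
--     return ans
-- ===== SOURCE B (Python) =====
-- def solution(n, t, m, p):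
--     T = "0123456789ABCDEF"
--     ans = []
--     g = 0
--     num = 0
--     while len(ans) < t:
--         # digits of num in base n, most significant first
--         s = ''
--         x = num
--         while True:
--             s = T[x % n] + s
--             x //= n
--             if x == 0:
--                 break
--         for d in s:
--             if g % m == p - 1 and len(ans) < t:
--                 ans.append(d)
--             g += 1
--         num += 1
--     return ''.join(ans)
-- ===== Notes on version B (the rewrite author's own statement) =====
-- stated objective: alternative
-- what changed: A precomputes the full digit list of all t*m numbers and then scans it with a second modular while-loop; B streams: it generates one number's digits at a time and selects the wanted positions in the same pass, stopping as soon as t digits are collected, never materialising the digit list.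
-- outside the precondition, e.g. on solution(100, 2, 3, 2): A returns '14', B returns '14'; on solution(0, 2, 2, 1): A raises ZeroDivisionError, B raises ZeroDivisionError
import Mathlib
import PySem

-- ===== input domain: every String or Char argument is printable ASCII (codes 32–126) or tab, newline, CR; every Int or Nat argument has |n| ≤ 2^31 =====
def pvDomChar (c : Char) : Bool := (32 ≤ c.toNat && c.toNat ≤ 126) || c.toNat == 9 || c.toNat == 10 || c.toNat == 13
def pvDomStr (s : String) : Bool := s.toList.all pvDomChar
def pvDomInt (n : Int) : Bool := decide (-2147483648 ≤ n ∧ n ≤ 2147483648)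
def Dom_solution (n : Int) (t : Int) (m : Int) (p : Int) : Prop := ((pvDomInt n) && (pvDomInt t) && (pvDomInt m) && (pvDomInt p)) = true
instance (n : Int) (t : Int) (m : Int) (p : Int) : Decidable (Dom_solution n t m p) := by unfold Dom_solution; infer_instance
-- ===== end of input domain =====

-- B streams base-n digits and selects every m-th position on the fly instead of A's
-- build-full-list-then-scan two-phase approach (return value only; neither mutates arguments).


-- ===== PORT A =====
def pvT : List Char := "0123456789ABCDEF".toList

-- convert_iter: exact for 0 ≤ i and 2 ≤ base (the inputs it meets inside Pre_solution);
-- the 'i / n < i' conjunct is a totality guard only (it always holds there when 0 < i / n).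
def pvConv (i n : Nat) : List Char :=
  if h : 0 < i / n ∧ i / n < i then pvConv (i / n) n ++ [pvT.getD (i % n) ' '] else [pvT.getD (i % n) ' ']
termination_by i
decreasing_by exact h.2

-- A's while-loop; the fuel only makes it total (inside Pre_solution the loop exits after
-- at most (t-1)*m + p + 1 ≤ t*m + 1 iterations); a failed index lookup returns ans (Python
-- raises there, outside Pre_solution). Python's list is an Array here (order is never
-- negative: it starts at 0 and only increments, so plain array indexing is exact).
def pvLoopA (L : Array Char) (t m p : Int) (ans : Array Char) (order : Nat) : Nat → Array Char
  | 0 => ans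
  | fuel+1 =>
    if (ans.size : Int) < t then
      if PySem.Int.mod (order : Int) m = p - 1 then
        match L[order]? with
        | none => ans
        | some c => pvLoopA L t m p (ans.push c) (order + 1) fuel
      else pvLoopA L t m p ans (order + 1) fuel
    else ans

def solution (n : Int) (t : Int) (m : Int) (p : Int) : String :=
  let numList := (PySem.List.pyRange 0 (t*m)).flatMap (fun i => pvConv i.toNat n.toNat)
  String.mk (pvLoopA numList.toArray t m p #[] 0 ((t*m).toNat + 1)).toList

-- ===== PORT B =====
-- inner do-while of Source B: prepend T[x % n], x //= n, stop when x == 0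
-- (exact for 2 ≤ n; the 'x / n < x' conjunct is a totality guard, always true there).
def pvConvB (x n : Nat) (acc : List Char) : List Char :=
  if h : 0 < x / n ∧ x / n < x then pvConvB (x / n) n (pvT.getD (x % n) ' ' :: acc) else pvT.getD (x % n) ' ' :: acc
termination_by x
decreasing_by exact h.2

-- body of Source B's for-loop over the digits of one number (Python's ans list is an Array here)
def pvStepB (t m p : Int) (st : Array Char × Int) (d : Char) : Array Char × Int :=
  (if PySem.Int.mod st.2 m = p - 1 ∧ (st.1.size : Int) < t then st.1.push d else st.1, st.2 + 1)

-- Source B's outer while-loop; the fuel only makes it total (inside Pre_solution it exits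
-- after at most t*m + 1 iterations since every number contributes at least one digit).
def pvLoopB (n t m p : Int) (ans : Array Char) (g : Int) (num : Nat) : Nat → Array Char
  | 0 => ans
  | fuel+1 =>
    if (ans.size : Int) < t then
      let st := (pvConvB num n.toNat []).foldl (pvStepB t m p) (ans, g)
      pvLoopB n t m p st.1 st.2 (num + 1) fuel
    else ans

def solution_alt (n : Int) (t : Int) (m : Int) (p : Int) : String :=
  String.mk (pvLoopB n t m p #[] 0 0 ((t*m).toNat + 1)).toList

-- ===== PRECONDITION & SPEC =====
-- Pre_ is the problem's contract (base 2..16, 1 ≤ p ≤ m) plus the trivial region t ≤ 0 ≤ m where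
-- both programs return '' untouched; outside the contract A raises (T[] index/zero division/unbounded
-- recursion) or loops forever (p > m) whenever its loops run, and the few remaining returns
-- (t*m ≤ 16 with an oversized or negative base) are accidental values of a meaningless conversion.
def Pre_solution (n : Int) (t : Int) (m : Int) (p : Int) : Prop :=
  (t ≤ 0 ∧ 0 ≤ m) ∨ (2 ≤ n ∧ n ≤ 16 ∧ 1 ≤ m ∧ 1 ≤ p ∧ p ≤ m)
instance (n : Int) (t : Int) (m : Int) (p : Int) : Decidable (Pre_solution n t m p) := by unfold Pre_solution; infer_instance

def pvWitness_solution : Int × Int × Int × Int := (2, 4, 2, 1)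

def Spec_solution (n : Int) (t : Int) (m : Int) (p : Int) (out : String) : Prop := out = solution_alt n t m p
instance (n : Int) (t : Int) (m : Int) (p : Int) (out : String) : Decidable (Spec_solution n t m p out) := by unfold Spec_solution; infer_instance

-- ===== CLAIM (what is proved, stated in full; the proofs are below) =====
def Claim_equal_solution : Prop := ∀ (n : Int) (t : Int) (m : Int) (p : Int), Dom_solution n t m p → Pre_solution n t m p → Spec_solution n t m p (solution n t m p)

-- ===== LEMMAS AND PROOFS =====

-- list-level models of the two loops (proof ghosts; the ports are bridged to them below)
def pvStep (t m p : Int) (st : List Char × Int) (d : Char) : List Char × Int :=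
  (if PySem.Int.mod st.2 m = p - 1 ∧ (st.1.length : Int) < t then st.1 ++ [d] else st.1, st.2 + 1)

def pvLoopAM (L : List Char) (t m p : Int) (ans : List Char) (order : Int) : Nat → List Char
  | 0 => ans
  | fuel+1 =>
    if (ans.length : Int) < t then
      if PySem.Int.mod order m = p - 1 then
        match PySem.List.pyGet? L order with
        | none => ans
        | some c => pvLoopAM L t m p (ans ++ [c]) (order + 1) fuel
      else pvLoopAM L t m p ans (order + 1) fuel
    else ans

def pvLoopBM (n t m p : Int) (ans : List Char) (g : Int) (num : Nat) : Nat → List Char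
  | 0 => ans
  | fuel+1 =>
    if (ans.length : Int) < t then
      let st := (pvConvB num n.toNat []).foldl (pvStep t m p) (ans, g)
      pvLoopBM n t m p st.1 st.2 (num + 1) fuel
    else ans

-- bridges: the array ports compute exactly the list models
theorem pvStepB_bridge (t m p : Int) (st : Array Char × Int) (d : Char) :
    ((pvStepB t m p st d).1.toList, (pvStepB t m p st d).2) = pvStep t m p (st.1.toList, st.2) d := by
  unfold pvStepB pvStep
  by_cases h : PySem.Int.mod st.2 m = p - 1 ∧ ((st.1.size : Nat) : Int) < t
  · rw [if_pos h, if_pos (by simpa using h)]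
    simp
  · rw [if_neg h, if_neg (by simpa using h)]

theorem pvFoldB_bridge (t m p : Int) (l : List Char) : ∀ (st : Array Char × Int),
    ((l.foldl (pvStepB t m p) st).1.toList, (l.foldl (pvStepB t m p) st).2)
      = l.foldl (pvStep t m p) (st.1.toList, st.2) := by
  induction l with
  | nil => intro st; simp
  | cons d l ih =>
    intro st
    rw [List.foldl_cons, List.foldl_cons, ← pvStepB_bridge]
    exact ih _

theorem pvLoopA_bridge (L : List Char) (t m p : Int) : ∀ (fuel : Nat) (a : Array Char) (o : Nat),
    (pvLoopA L.toArray t m p a o fuel).toList = pvLoopAM L t m p a.toList ((o : Nat) : Int) fuel := by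
  intro fuel
  induction fuel with
  | zero => intro a o; rfl
  | succ f ih =>
    intro a o
    have hc : (((o + 1 : Nat)) : Int) = ((o : Nat) : Int) + 1 := by push_cast; ring
    simp only [pvLoopA, pvLoopAM, Array.length_toList]
    by_cases hlt : ((a.size : Int) < t)
    · simp only [if_pos hlt]
      by_cases hmod : PySem.Int.mod ((o : Nat) : Int) m = p - 1
      · simp only [if_pos hmod]
        rw [PySem.List.pyGet?_natCast, ← List.getElem?_toArray]
        cases hg : L.toArray[o]? with
        | none => simp
        | some c =>
          rw [ih (a.push c) (o + 1), hc]
          simp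
      · simp only [if_neg hmod]
        rw [ih a (o + 1), hc]
    · simp only [if_neg hlt]

theorem pvLoopB_bridge (n t m p : Int) : ∀ (fuel : Nat) (a : Array Char) (g : Int) (num : Nat),
    (pvLoopB n t m p a g num fuel).toList = pvLoopBM n t m p a.toList g num fuel := by
  intro fuel
  induction fuel with
  | zero => intro a g num; rfl
  | succ f ih =>
    intro a g num
    simp only [pvLoopB, pvLoopBM, Array.length_toList]
    by_cases hlt : ((a.size : Int) < t)
    · simp only [if_pos hlt]
      have hb := pvFoldB_bridge t m p (pvConvB num n.toNat []) (a, g)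
      rw [ih]
      have h1 : ((pvConvB num n.toNat []).foldl (pvStepB t m p) (a, g)).1.toList
          = ((pvConvB num n.toNat []).foldl (pvStep t m p) (a.toList, g)).1 := by
        rw [← hb]
      have h2 : ((pvConvB num n.toNat []).foldl (pvStepB t m p) (a, g)).2
          = ((pvConvB num n.toNat []).foldl (pvStep t m p) (a.toList, g)).2 := by
        rw [← hb]
      rw [h1, h2]
    · simp only [if_neg hlt]


-- the concatenated digit stream of the numbers 0, 1, …, K-1
def pvStream (n K : Nat) : List Char := (List.range K).flatMap (fun i => pvConv i n)

theorem pvConv_ne_nil (i n : Nat) : pvConv i n ≠ [] := by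
  unfold pvConv; split <;> simp

theorem pvConvB_eq (x n : Nat) : ∀ acc, pvConvB x n acc = pvConv x n ++ acc := by
  induction x using Nat.strong_induction_on with
  | _ x ih =>
    intro acc
    unfold pvConvB pvConv
    split
    · next h => rw [ih _ h.2]; simp
    · simp

theorem pvStream_succ (n K : Nat) : pvStream n (K+1) = pvStream n K ++ pvConv K n := by
  simp [pvStream, List.range_succ]

theorem pvStream_len (n K : Nat) : K ≤ (pvStream n K).length := by
  induction K with
  | zero => simp
  | succ K ih =>
    rw [pvStream_succ]
    have := pvConv_ne_nil K n
    have h1 : 0 < (pvConv K n).length := List.length_pos_iff.mpr this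
    simp only [List.length_append]
    omega

-- the foldl's ans component only grows
theorem pvFold_mono (t m p : Int) (l : List Char) : ∀ st : List Char × Int,
    st.1.length ≤ ((l.foldl (pvStep t m p) st).1).length := by
  induction l with
  | nil => intro st; simp
  | cons d l ih =>
    intro st
    rw [List.foldl_cons]
    refine le_trans ?_ (ih (pvStep t m p st d))
    unfold pvStep; split <;> simp

-- once ans has t characters the fold is a no-op on it
theorem pvFold_sat (t m p : Int) (l : List Char) : ∀ st : List Char × Int,
    t ≤ (st.1.length : Int) → (l.foldl (pvStep t m p) st).1 = st.1 := by
  induction l with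
  | nil => intro st _; simp
  | cons d l ih =>
    intro st h
    have e : pvStep t m p st d = (st.1, st.2 + 1) := by
      unfold pvStep
      rw [if_neg]
      rintro ⟨-, h2⟩; omega
    rw [List.foldl_cons, e, ih _ (by simpa using h)]

-- enough selected positions inside l ⇒ the fold reaches t characters
theorem pvFold_len (t m p : Int) (l : List Char) : ∀ (ans : List Char) (g : Int),
    t ≤ (ans.length : Int) + ((List.range l.length).countP (fun (j : Nat) => decide (PySem.Int.mod (g + (j : Int)) m = p - 1)) : Int) →
    t ≤ (((l.foldl (pvStep t m p) (ans, g)).1.length : Int)) := by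
  induction l with
  | nil => intro ans g h; simpa using h
  | cons d l ih =>
    intro ans g h
    have hcnt : (List.range (d :: l).length).countP (fun (j : Nat) => decide (PySem.Int.mod (g + (j : Int)) m = p - 1))
        = (if PySem.Int.mod g m = p - 1 then 1 else 0)
          + (List.range l.length).countP (fun (j : Nat) => decide (PySem.Int.mod ((g + 1) + (j : Int)) m = p - 1)) := by
      rw [List.length_cons, List.range_succ_eq_map, List.countP_cons, List.countP_map]
      have : ((fun (j : Nat) => decide (PySem.Int.mod (g + (j : Int)) m = p - 1)) ∘ Nat.succ)
          = fun (j : Nat) => decide (PySem.Int.mod ((g + 1) + (j : Int)) m = p - 1) := by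
        funext j
        simp only [Function.comp]
        congr 1
        have : g + ((Nat.succ j : Nat) : Int) = (g + 1) + (j : Int) := by push_cast; ring
        rw [this]
      rw [this]
      simp only [Nat.cast_zero, add_zero]
      by_cases hg : PySem.Int.mod g m = p - 1 <;> simp [hg, Nat.add_comm]
    rw [List.foldl_cons]
    by_cases hlt : (ans.length : Int) < t
    · by_cases hmod : PySem.Int.mod g m = p - 1
      · have e : pvStep t m p (ans, g) d = (ans ++ [d], g + 1) := by
          unfold pvStep; rw [if_pos ⟨hmod, hlt⟩]
        rw [e]
        apply ih
        rw [hcnt, if_pos hmod] at h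
        simp only [List.length_append, List.length_cons, List.length_nil]
        push_cast at h ⊢
        omega
      · have e : pvStep t m p (ans, g) d = (ans, g + 1) := by
          unfold pvStep; rw [if_neg]; rintro ⟨h1, -⟩; exact hmod h1
        rw [e]
        apply ih
        rw [hcnt, if_neg hmod] at h
        push_cast at h ⊢
        omega
    · have : t ≤ (ans.length : Int) := by omega
      calc t ≤ (ans.length : Int) := this
        _ ≤ _ := by exact_mod_cast Int.ofNat_le.mpr (pvFold_mono t m p (d :: l) (ans, g))
-- count of the selected residue inside range (a * m') is at least a
theorem pvCount_ge (m p : Int) (hm : 1 ≤ m) (hp1 : 1 ≤ p) (hpm : p ≤ m) :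
    ∀ a : Nat, a ≤ (List.range (a * m.toNat)).countP (fun (j : Nat) => decide (PySem.Int.mod ((j : Int)) m = p - 1)) := by
  intro a
  induction a with
  | zero => simp
  | succ a ih =>
    have hsplit : List.range ((a + 1) * m.toNat) = List.range (a * m.toNat) ++ (List.range m.toNat).map (fun x => a * m.toNat + x) := by
      rw [Nat.succ_mul, List.range_add]
    rw [hsplit, List.countP_append, List.countP_map]
    have hone : 0 < (List.range m.toNat).countP ((fun (j : Nat) => decide (PySem.Int.mod ((j : Int)) m = p - 1)) ∘ (fun x => a * m.toNat + x)) := by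
      rw [List.countP_pos_iff]
      refine ⟨(p - 1).toNat, ?_, ?_⟩
      · rw [List.mem_range]; omega
      · simp only [Function.comp]
        rw [decide_eq_true_iff]
        rw [PySem.Int.mod_eq_emod_of_pos (by omega)]
        have h1 : ((m.toNat : Nat) : Int) = m := Int.toNat_of_nonneg (by omega)
        have h2 : (((p - 1).toNat : Nat) : Int) = p - 1 := Int.toNat_of_nonneg (by omega)
        have hcast : ((a * m.toNat + (p - 1).toNat : Nat) : Int) = (p - 1) + m * (a : Int) := by
          push_cast [h1, h2]; ring
        rw [hcast, Int.add_mul_emod_self_left]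
        exact Int.emod_eq_of_lt (by omega) (by omega)
    omega

theorem pvCount_mono (P : Nat → Bool) (a b : Nat) (h : a ≤ b) :
    (List.range a).countP P ≤ (List.range b).countP P := by
  have hb : b = a + (b - a) := by omega
  rw [hb, List.range_add, List.countP_append]
  exact Nat.le_add_right _ _

-- A's fueled while-loop equals the fold over a prefix of the remaining stream
theorem pvLoopAM_eq (L : List Char) (t m p : Int) : ∀ (l : List Char) (fuel : Nat) (ans : List Char) (o : Nat),
    (∃ rest, L.drop o = l ++ rest) → l.length ≤ fuel →
    t ≤ (((l.foldl (pvStep t m p) (ans, (o : Int))).1.length : Int)) →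
    pvLoopAM L t m p ans (o : Int) fuel = (l.foldl (pvStep t m p) (ans, (o : Int))).1 := by
  intro l
  induction l with
  | nil =>
    intro fuel ans o _ _ hlen
    simp only [List.foldl_nil] at hlen ⊢
    cases fuel with
    | zero => rfl
    | succ f =>
      simp only [pvLoopAM]
      rw [if_neg (by omega)]
  | cons d l ih =>
    intro fuel ans o hpre hfuel hlen
    obtain ⟨rest, hdrop⟩ := hpre
    cases fuel with
    | zero => simp at hfuel
    | succ f =>
      have hget : PySem.List.pyGet? L ((o : Nat) : Int) = some d := by
        rw [PySem.List.pyGet?_natCast, ← List.head?_drop, hdrop]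
        rfl
      have hdrop' : L.drop (o + 1) = l ++ rest := by
        rw [← List.tail_drop, hdrop]
        rfl
      have hcast : ((o : Int) + 1) = (((o + 1 : Nat)) : Int) := by push_cast; ring
      simp only [pvLoopAM]
      by_cases hlt : ((ans.length : Int) < t)
      · rw [if_pos hlt]
        by_cases hmod : PySem.Int.mod (o : Int) m = p - 1
        · rw [if_pos hmod, hget]
          have estep : pvStep t m p (ans, (o : Int)) d = (ans ++ [d], (o : Int) + 1) := by
            unfold pvStep; rw [if_pos ⟨hmod, hlt⟩]
          rw [List.foldl_cons, estep] at hlen ⊢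
          rw [hcast] at hlen ⊢
          exact ih f (ans ++ [d]) (o + 1) ⟨rest, hdrop'⟩ (by simp at hfuel ⊢; omega) hlen
        · rw [if_neg hmod]
          have estep : pvStep t m p (ans, (o : Int)) d = (ans, (o : Int) + 1) := by
            unfold pvStep; rw [if_neg]; rintro ⟨h1, -⟩; exact hmod h1
          rw [List.foldl_cons, estep] at hlen ⊢
          rw [hcast] at hlen ⊢
          exact ih f ans (o + 1) ⟨rest, hdrop'⟩ (by simp at hfuel ⊢; omega) hlen
      · rw [if_neg hlt]
        rw [pvFold_sat t m p (d :: l) (ans, (o : Int)) (by simp; omega)]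

-- B's fueled while-loop equals the fold over the stream of the numbers it visits
theorem pvLoopBM_eq (n t m p : Int) : ∀ (fuel : Nat) (ans : List Char) (g : Int) (num : Nat),
    t ≤ ((((List.range' num fuel).flatMap (fun i => pvConv i n.toNat)).foldl (pvStep t m p) (ans, g)).1.length : Int) →
    pvLoopBM n t m p ans g num fuel = (((List.range' num fuel).flatMap (fun i => pvConv i n.toNat)).foldl (pvStep t m p) (ans, g)).1 := by
  intro fuel
  induction fuel with
  | zero => intro ans g num _; simp [pvLoopBM]
  | succ f ih =>
    intro ans g num h
    rw [List.range'_succ, List.flatMap_cons, List.foldl_append] at h ⊢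
    simp only [pvLoopBM]
    by_cases hlt : ((ans.length : Int) < t)
    · rw [if_pos hlt]
      have hc : pvConvB num n.toNat [] = pvConv num n.toNat := by
        rw [pvConvB_eq]; simp
      rw [hc]
      have := ih ((pvConv num n.toNat).foldl (pvStep t m p) (ans, g)).1
        ((pvConv num n.toNat).foldl (pvStep t m p) (ans, g)).2 (num + 1)
      rw [Prod.mk.eta] at this
      exact this h
    · rw [if_neg hlt]
      have hta : t ≤ (ans.length : Int) := by omega
      have h1 : ((pvConv num n.toNat).foldl (pvStep t m p) (ans, g)).1 = ans :=
        pvFold_sat t m p _ _ hta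
      rw [pvFold_sat t m p _ _ (by rw [h1]; exact hta), h1]

-- A's num_list is the digit stream of the first (t*m) numbers
theorem pvNumList_eq (n t m : Int) :
    (PySem.List.pyRange 0 (t*m)).flatMap (fun i => pvConv i.toNat n.toNat) = pvStream n.toNat (t*m).toNat := by
  rw [PySem.List.pyRange_one, List.flatMap_map]
  simp [pvStream]

theorem solution_main (n t m p : Int) (hPre : Pre_solution n t m p) :
    solution n t m p = solution_alt n t m p := by
  rcases hPre with ⟨ht, hm⟩ | ⟨hn2, hn16, hm1, hp1, hpm⟩
  · -- trivial region: t ≤ 0 ≤ m, both loops exit at once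
    have hK : (t * m).toNat = 0 := by
      have : t * m ≤ 0 := mul_nonpos_iff.mpr (Or.inr ⟨ht, hm⟩)
      omega
    simp only [solution, solution_alt, hK]
    have h0 : ¬ (((#[] : Array Char).size : Int) < t) := by simp; omega
    simp only [pvLoopA, pvLoopB, if_neg h0]
  · -- contract region
    have hmpos : (0 : Int) < m := by omega
    set K := (t * m).toNat with hKdef
    set L := pvStream n.toNat K with hL
    have hKlen : K ≤ L.length := pvStream_len n.toNat K
    set S1 := L.take K with hS1
    have hS1len : S1.length = K := by
      rw [hS1, List.length_take]; omega
    have hsplit : L = S1 ++ L.drop K := (List.take_append_drop K L).symm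
    -- enough selected positions inside S1
    have hcount : t ≤ ((([] : List Char).length : Int)) +
        ((List.range S1.length).countP (fun (j : Nat) => decide (PySem.Int.mod ((0 : Int) + (j : Int)) m = p - 1)) : Int) := by
      have hpred : (fun (j : Nat) => decide (PySem.Int.mod ((0 : Int) + (j : Int)) m = p - 1))
          = fun (j : Nat) => decide (PySem.Int.mod ((j : Int)) m = p - 1) := by
        funext j; rw [zero_add]
      rw [hpred, hS1len]
      by_cases htpos : 0 < t
      · have htm : t.toNat * m.toNat ≤ K := by
          have h1 : ((t.toNat : Nat) : Int) = t := Int.toNat_of_nonneg (by omega)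
          have h2 : ((m.toNat : Nat) : Int) = m := Int.toNat_of_nonneg (by omega)
          have : ((t.toNat * m.toNat : Nat) : Int) = t * m := by push_cast [h1, h2]; ring
          omega
        have hge := pvCount_ge m p hm1 hp1 hpm t.toNat
        have hmono := pvCount_mono (fun (j : Nat) => decide (PySem.Int.mod ((j : Int)) m = p - 1))
          (t.toNat * m.toNat) K htm
        simp only [List.length_nil, Nat.cast_zero, zero_add]
        omega
      · have : (0 : Int) ≤ ((List.range K).countP (fun (j : Nat) => decide (PySem.Int.mod ((j : Int)) m = p - 1)) : Int) := by positivity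
        simp only [List.length_nil, Nat.cast_zero, zero_add]
        omega
    have hfold1 : t ≤ ((S1.foldl (pvStep t m p) ([], (0 : Int))).1.length : Int) := by
      have := pvFold_len t m p S1 [] 0 hcount
      simpa using this
    -- A's side
    have hA : pvLoopAM L t m p [] 0 (K + 1) = (S1.foldl (pvStep t m p) ([], (0 : Int))).1 := by
      have := pvLoopAM_eq L t m p S1 (K + 1) [] 0
        ⟨L.drop K, by rw [List.drop_zero]; exact hsplit⟩ (by omega) (by simpa using hfold1)
      simpa using this
    -- B's side
    have hstream : (List.range' 0 (K + 1)).flatMap (fun i => pvConv i n.toNat) = S1 ++ (L.drop K ++ pvConv K n.toNat) := by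
      rw [← List.range_eq_range']
      show pvStream n.toNat (K + 1) = S1 ++ (L.drop K ++ pvConv K n.toNat)
      rw [pvStream_succ, ← hL]
      conv_lhs => rw [hsplit]
      rw [List.append_assoc]
    have hsat2 : ((((List.range' 0 (K + 1)).flatMap (fun i => pvConv i n.toNat)).foldl (pvStep t m p) ([], (0 : Int))).1)
        = (S1.foldl (pvStep t m p) ([], (0 : Int))).1 := by
      rw [hstream, List.foldl_append]
      exact pvFold_sat t m p _ _ hfold1
    have hB : pvLoopBM n t m p [] 0 0 (K + 1) = (S1.foldl (pvStep t m p) ([], (0 : Int))).1 := by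
      rw [pvLoopBM_eq n t m p (K + 1) [] 0 0 (by rw [hsat2]; exact hfold1)]
      exact hsat2
    simp only [solution, solution_alt]
    rw [pvNumList_eq n t m, ← hKdef, ← hL]
    rw [pvLoopA_bridge L t m p (K + 1) #[] 0, pvLoopB_bridge n t m p (K + 1) #[] 0 0]
    simp only [Nat.cast_zero]
    rw [hA, hB]

-- ===== VERDICT (by name: the statement is the Claim_ definition above) =====
theorem solution_spec : Claim_equal_solution := by
  intro n t m p _ hPre
  unfold Spec_solution
  exact solution_main n t m p hPre
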